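-- pv_equiv track=rewrite | github.com/ChahelPaatur/Self-Modifying-Program-Synthesis-via-Online-Library-Evolution | common/advanced_ops.py | detect_and_complete_symmetry
-- ===== SOURCE A (Python) =====
-- from typing import List, Dict, Set, Tuple, Optional, Callable
--
-- Grid = List[List[int]]
--
-- def detect_and_complete_symmetry(grid: Grid) -> Optional[Grid]:
--     """Detect partial symmetry and complete it"""
--     if not grid:
--         return None
--
--     h, w = len(grid), len(grid[0])
--
--     # Try vertical symmetry
--     for split in range(1, w):
--         left = [row[:split] for row in grid]
--         right = [row[split:] for row in grid]
--         if len(left[0]) == len(right[0]):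
--             right_flipped = [row[::-1] for row in right]
--             if left == right_flipped:
--                 return grid  # Already symmetric
--
--     # Try horizontal symmetry
--     for split in range(1, h):
--         top = grid[:split]
--         bottom = grid[split:]
--         if len(top) == len(bottom):
--             bottom_flipped = bottom[::-1]
--             if top == bottom_flipped:
--                 return grid  # Already symmetric
--
--     return None
-- ===== SOURCE B (Python) =====
-- from typing import List, Optional
--
-- Grid = List[List[int]]
--
-- def detect_and_complete_symmetry(grid: Grid) -> Optional[Grid]:
--     """Only the center split can pass A's equal-length test, so check it directly."""
--     if not grid:
--         return None
--     h, w = len(grid), len(grid[0])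
--     if w >= 2 and w % 2 == 0:
--         half = w // 2
--         if all(row[:half] == row[half:][::-1] for row in grid):
--             return grid
--     if h >= 2 and h % 2 == 0:
--         half = h // 2
--         if grid[:half] == grid[half:][::-1]:
--             return grid
--     return None
-- ===== Notes on version B (the rewrite author's own statement) =====
-- stated objective: faster
-- what changed: A scans every split position 1..w-1 and 1..h-1, building both halves each time; only the center split can pass A's equal-length guard, so B checks just the single middle split per axis with per-row half comparisons.
import Mathlib
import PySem

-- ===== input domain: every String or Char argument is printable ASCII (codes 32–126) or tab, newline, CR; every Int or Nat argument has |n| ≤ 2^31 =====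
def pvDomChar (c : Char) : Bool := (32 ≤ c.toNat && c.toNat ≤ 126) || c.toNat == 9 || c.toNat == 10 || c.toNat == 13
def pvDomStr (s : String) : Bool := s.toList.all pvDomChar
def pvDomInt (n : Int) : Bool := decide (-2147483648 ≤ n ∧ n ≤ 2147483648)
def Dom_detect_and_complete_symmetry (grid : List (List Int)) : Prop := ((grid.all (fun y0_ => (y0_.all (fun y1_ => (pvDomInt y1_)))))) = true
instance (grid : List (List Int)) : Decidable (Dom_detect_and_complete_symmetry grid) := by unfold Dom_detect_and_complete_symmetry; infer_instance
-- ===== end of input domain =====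

-- B checks only the single center split per axis (the only split that can pass A's
-- equal-length guard), O(h*w) instead of A's scan over all splits.

-- ===== PORT A =====
-- A's vertical loop: for split in range(1, w): left/right column halves; len(left[0]) is
-- the length of grid[0][:split] (grid is nonempty here, its head is r0).
def pvVLoopA (g : List (List Int)) (r0 : List Int) : List Int → Option (List (List Int))
  | [] => none
  | split :: rest =>
    let left := g.map (fun row => PySem.List.slice row none (some split))
    let right := g.map (fun row => PySem.List.slice row (some split) none)
    if (PySem.List.slice r0 none (some split)).length = (PySem.List.slice r0 (some split) none).length then
      let right_flipped := right.map (fun row => row.reverse)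
      if left = right_flipped then some g else pvVLoopA g r0 rest
    else pvVLoopA g r0 rest

-- A's horizontal loop: for split in range(1, h): top/bottom row halves.
def pvHLoopA (g : List (List Int)) : List Int → Option (List (List Int))
  | [] => none
  | split :: rest =>
    let top := PySem.List.slice g none (some split)
    let bottom := PySem.List.slice g (some split) none
    if top.length = bottom.length then
      if top = bottom.reverse then some g else pvHLoopA g rest
    else pvHLoopA g rest

def detect_and_complete_symmetry (grid : List (List Int)) : Option (List (List Int)) :=
  match grid with
  | [] => none
  | r0 :: rs =>
    let g := r0 :: rs
    let h : Int := (g.length : Int)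
    let w : Int := (r0.length : Int)
    match pvVLoopA g r0 (PySem.List.pyRange 1 w 1) with
    | some res => some res
    | none => pvHLoopA g (PySem.List.pyRange 1 h 1)

-- ===== PORT B =====
def detect_and_complete_symmetry_alt (grid : List (List Int)) : Option (List (List Int)) :=
  match grid with
  | [] => none
  | r0 :: rs =>
    let g := r0 :: rs
    let h : Int := (g.length : Int)
    let w : Int := (r0.length : Int)
    if 2 ≤ w ∧ w % 2 = 0 ∧
        g.all (fun row =>
          PySem.List.slice row none (some (PySem.Int.floordiv w 2)) =
            (PySem.List.slice row (some (PySem.Int.floordiv w 2)) none).reverse) then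
      some g
    else if 2 ≤ h ∧ h % 2 = 0 ∧
        PySem.List.slice g none (some (PySem.Int.floordiv h 2)) =
          (PySem.List.slice g (some (PySem.Int.floordiv h 2)) none).reverse then
      some g
    else
      none

-- ===== PRECONDITION & SPEC =====
def Spec_detect_and_complete_symmetry (grid : List (List Int)) (out : Option (List (List Int))) : Prop := out = detect_and_complete_symmetry_alt grid
instance (grid : List (List Int)) (out : Option (List (List Int))) : Decidable (Spec_detect_and_complete_symmetry grid out) := by unfold Spec_detect_and_complete_symmetry; infer_instance

-- ===== CLAIM (what is proved, stated in full; the proofs are below) =====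
def Claim_equal_detect_and_complete_symmetry : Prop := ∀ (grid : List (List Int)), Dom_detect_and_complete_symmetry grid → Spec_detect_and_complete_symmetry grid (detect_and_complete_symmetry grid)

-- ===== LEMMAS AND PROOFS =====


-- A split strictly inside xs produces equal-length halves iff it is the exact middle.
theorem pvLenSplit {α : Type} (xs : List α) (s : Int) (h1 : 1 ≤ s) (h2 : s < (xs.length : Int)) :
    ((PySem.List.slice xs none (some s)).length = (PySem.List.slice xs (some s) none).length) ↔
      2 * s = (xs.length : Int) := by
  obtain ⟨n, rfl⟩ : ∃ n : Nat, s = (n : Int) := ⟨s.toNat, by omega⟩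
  rw [PySem.List.slice_to_natCast, PySem.List.slice_from_natCast]
  simp only [List.length_take, List.length_drop]
  omega

-- A's vertical loop returns some g iff some admissible split passes both of its tests.
theorem pvVLoopA_char (g : List (List Int)) (r0 : List Int) (splits : List Int)
    (hb : ∀ s, s ∈ splits → 1 ≤ s ∧ s < (r0.length : Int)) :
    pvVLoopA g r0 splits =
      (if ∃ s, s ∈ splits ∧ 2 * s = (r0.length : Int) ∧
          g.map (fun row => PySem.List.slice row none (some s)) =
            (g.map (fun row => PySem.List.slice row (some s) none)).map (fun row => row.reverse)
       then some g else none) := by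
  induction splits with
  | nil => simp [pvVLoopA]
  | cons s rest ih =>
    have hbs := hb s (by simp)
    have hlen := pvLenSplit r0 s hbs.1 hbs.2
    have ih' := ih (fun t ht => hb t (by simp [ht]))
    simp only [pvVLoopA]
    by_cases hl : (PySem.List.slice r0 none (some s)).length = (PySem.List.slice r0 (some s) none).length
    · have hmid : 2 * s = (r0.length : Int) := hlen.mp hl
      by_cases hc : g.map (fun row => PySem.List.slice row none (some s)) =
          (g.map (fun row => PySem.List.slice row (some s) none)).map (fun row => row.reverse)
      · rw [if_pos hl, if_pos hc, if_pos ⟨s, by simp, hmid, hc⟩]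
      · rw [if_pos hl, if_neg hc, ih']
        by_cases hex : ∃ t, t ∈ rest ∧ 2 * t = (r0.length : Int) ∧
            g.map (fun row => PySem.List.slice row none (some t)) =
              (g.map (fun row => PySem.List.slice row (some t) none)).map (fun row => row.reverse)
        · obtain ⟨t, ht, h2t, hct⟩ := hex
          rw [if_pos ⟨t, ht, h2t, hct⟩, if_pos ⟨t, by simp [ht], h2t, hct⟩]
        · rw [if_neg hex, if_neg]
          rintro ⟨t, htm, h2t, hct⟩
          rcases List.mem_cons.mp htm with rfl | ht
          · exact hc hct
          · exact hex ⟨t, ht, h2t, hct⟩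
    · rw [if_neg hl, ih']
      have hne : 2 * s ≠ (r0.length : Int) := fun h => hl (hlen.mpr h)
      by_cases hex : ∃ t, t ∈ rest ∧ 2 * t = (r0.length : Int) ∧
          g.map (fun row => PySem.List.slice row none (some t)) =
            (g.map (fun row => PySem.List.slice row (some t) none)).map (fun row => row.reverse)
      · obtain ⟨t, ht, h2t, hct⟩ := hex
        rw [if_pos ⟨t, ht, h2t, hct⟩, if_pos ⟨t, by simp [ht], h2t, hct⟩]
      · rw [if_neg hex, if_neg]
        rintro ⟨t, htm, h2t, hct⟩
        rcases List.mem_cons.mp htm with rfl | ht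
        · exact hne h2t
        · exact hex ⟨t, ht, h2t, hct⟩

-- A's horizontal loop, same characterisation over row splits.
theorem pvHLoopA_char (g : List (List Int)) (splits : List Int)
    (hb : ∀ s, s ∈ splits → 1 ≤ s ∧ s < (g.length : Int)) :
    pvHLoopA g splits =
      (if ∃ s, s ∈ splits ∧ 2 * s = (g.length : Int) ∧
          PySem.List.slice g none (some s) = (PySem.List.slice g (some s) none).reverse
       then some g else none) := by
  induction splits with
  | nil => simp [pvHLoopA]
  | cons s rest ih =>
    have hbs := hb s (by simp)
    have hlen := pvLenSplit g s hbs.1 hbs.2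
    have ih' := ih (fun t ht => hb t (by simp [ht]))
    simp only [pvHLoopA]
    by_cases hl : (PySem.List.slice g none (some s)).length = (PySem.List.slice g (some s) none).length
    · have hmid : 2 * s = (g.length : Int) := hlen.mp hl
      by_cases hc : PySem.List.slice g none (some s) = (PySem.List.slice g (some s) none).reverse
      · rw [if_pos hl, if_pos hc, if_pos ⟨s, by simp, hmid, hc⟩]
      · rw [if_pos hl, if_neg hc, ih']
        by_cases hex : ∃ t, t ∈ rest ∧ 2 * t = (g.length : Int) ∧
            PySem.List.slice g none (some t) = (PySem.List.slice g (some t) none).reverse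
        · obtain ⟨t, ht, h2t, hct⟩ := hex
          rw [if_pos ⟨t, ht, h2t, hct⟩, if_pos ⟨t, by simp [ht], h2t, hct⟩]
        · rw [if_neg hex, if_neg]
          rintro ⟨t, htm, h2t, hct⟩
          rcases List.mem_cons.mp htm with rfl | ht
          · exact hc hct
          · exact hex ⟨t, ht, h2t, hct⟩
    · rw [if_neg hl, ih']
      have hne : 2 * s ≠ (g.length : Int) := fun h => hl (hlen.mpr h)
      by_cases hex : ∃ t, t ∈ rest ∧ 2 * t = (g.length : Int) ∧
          PySem.List.slice g none (some t) = (PySem.List.slice g (some t) none).reverse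
      · obtain ⟨t, ht, h2t, hct⟩ := hex
        rw [if_pos ⟨t, ht, h2t, hct⟩, if_pos ⟨t, by simp [ht], h2t, hct⟩]
      · rw [if_neg hex, if_neg]
        rintro ⟨t, htm, h2t, hct⟩
        rcases List.mem_cons.mp htm with rfl | ht
        · exact hne h2t
        · exact hex ⟨t, ht, h2t, hct⟩

-- The existential over range(1, L) collapses to the single center split L // 2.
theorem pvExists_mid (L : Int) (hL : 0 ≤ L) (P : Int → Prop) :
    (∃ s, s ∈ PySem.List.pyRange 1 L 1 ∧ 2 * s = L ∧ P s) ↔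
      (2 ≤ L ∧ L % 2 = 0 ∧ P (PySem.Int.floordiv L 2)) := by
  by_cases h2 : 2 ≤ L
  · rw [PySem.Int.floordiv_eq_ediv_of_pos (by omega)]
    constructor
    · rintro ⟨s, hs, h2s, hp⟩
      rw [PySem.List.mem_pyRange_one] at hs
      have heq : s = L / 2 := by omega
      exact ⟨by omega, by omega, heq ▸ hp⟩
    · rintro ⟨_, he, hp⟩
      exact ⟨L / 2, PySem.List.mem_pyRange_one.mpr (by omega), by omega, hp⟩
  · constructor
    · rintro ⟨s, hs, h2s, hp⟩
      rw [PySem.List.mem_pyRange_one] at hs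
      omega
    · rintro ⟨h, _, _⟩; omega


-- ===== VERDICT (by name: the statement is the Claim_ definition above) =====
theorem detect_and_complete_symmetry_spec : Claim_equal_detect_and_complete_symmetry := by
  intro grid _
  unfold Spec_detect_and_complete_symmetry
  cases grid with
  | nil => rfl
  | cons r0 rs =>
    simp only [detect_and_complete_symmetry, detect_and_complete_symmetry_alt]
    rw [pvVLoopA_char (r0 :: rs) r0 _
          (fun s hs => by rw [PySem.List.mem_pyRange_one] at hs; exact ⟨hs.1, hs.2⟩),
        pvHLoopA_char (r0 :: rs) _
          (fun s hs => by rw [PySem.List.mem_pyRange_one] at hs; exact ⟨hs.1, hs.2⟩),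
        ]
    simp only [pvExists_mid _ (Int.natCast_nonneg _)]
    have hall : ((r0 :: rs).map (fun row => PySem.List.slice row none (some (PySem.Int.floordiv (r0.length : Int) 2))) =
          ((r0 :: rs).map (fun row => PySem.List.slice row (some (PySem.Int.floordiv (r0.length : Int) 2)) none)).map
            (fun row => row.reverse)) ↔
        ((r0 :: rs).all (fun row =>
          PySem.List.slice row none (some (PySem.Int.floordiv (r0.length : Int) 2)) =
            (PySem.List.slice row (some (PySem.Int.floordiv (r0.length : Int) 2)) none).reverse) = true) := by
      rw [List.map_map, List.map_inj_left, List.all_eq_true]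
      simp
    simp only [← hall]
    by_cases hv : 2 ≤ (r0.length : Int) ∧ (r0.length : Int) % 2 = 0 ∧
        (r0 :: rs).map (fun row => PySem.List.slice row none (some (PySem.Int.floordiv (r0.length : Int) 2))) =
          ((r0 :: rs).map (fun row => PySem.List.slice row (some (PySem.Int.floordiv (r0.length : Int) 2)) none)).map
            (fun row => row.reverse)
    · simp only [if_pos hv]
    · simp only [if_neg hv]
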